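-- pv_equiv track=rewrite | github.com/PorametKeawubol/pythonic | asdasddsad.py | replace_questions
-- ===== SOURCE A (Python) =====
-- def replace_questions(s, t_str):
--     s_list = list(s)
--     t_index = 0
--
--     for i in range(len(s_list)):
--         if s_list[i] == '?':
--             s_list[i] = t_str[t_index]
--             t_index = (t_index + 1) % len(t_str)
--
--     return ''.join(s_list)
-- ===== SOURCE B (Python) =====
-- def replace_questions(s, t_str):
--     out = []
--     rest = s
--     t = t_str
--     while True:
--         i = rest.find('?')
--         if i < 0:
--             out.append(rest)
--             return ''.join(out)
--         out.append(rest[:i])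
--         out.append(t[0])
--         rest = rest[i + 1:]
--         t = t[1:] + t[:1]
-- ===== Notes on version B (the rewrite author's own statement) =====
-- stated objective: faster
-- what changed: B replaces A's per-character index loop with a modular counter by repeated str.find('?') jumps that splice slices together and rotate t_str left by one at each replacement; find and slicing run at C speed so non-'?' characters are never visited in Python-level code.
import Mathlib
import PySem

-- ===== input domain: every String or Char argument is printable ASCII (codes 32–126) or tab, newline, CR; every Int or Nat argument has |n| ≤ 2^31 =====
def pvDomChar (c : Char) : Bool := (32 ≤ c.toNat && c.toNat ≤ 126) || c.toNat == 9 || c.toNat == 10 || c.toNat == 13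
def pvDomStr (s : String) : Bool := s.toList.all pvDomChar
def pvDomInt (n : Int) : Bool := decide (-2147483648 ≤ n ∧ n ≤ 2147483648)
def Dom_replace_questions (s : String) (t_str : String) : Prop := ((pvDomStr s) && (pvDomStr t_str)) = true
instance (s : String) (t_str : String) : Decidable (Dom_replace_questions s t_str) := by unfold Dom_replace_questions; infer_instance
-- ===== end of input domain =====

-- B replaces A's per-character loop with a modular counter by repeated find('?') jumps,
-- splicing slices and rotating t_str left by one per replacement (objective: alternative).

-- ===== PORT A =====
-- the for-loop over positions: each char is kept, or (if '?') replaced by t_str[t_index];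
-- t_str[t_index] is total here via getD — the default is only reached when t = [],
-- where Python raises IndexError (excluded by Pre_).
def pvGoA (t : List Char) : List Char → Nat → List Char
  | [], _ => []
  | c :: rest, ti =>
    if c = '?' then t.getD ti '?' :: pvGoA t rest ((ti + 1) % t.length)
    else c :: pvGoA t rest ti

def replace_questions (s : String) (t_str : String) : String :=
  String.ofList (pvGoA t_str.toList s.toList 0)

-- ===== PORT B =====
-- the while-loop of Source B: i = rest.find('?'); if absent emit rest, else emit rest[:i], t[0],
-- and continue on rest[i+1:] with t rotated (t[1:] + t[:1]).  t[0] is total via getD (Python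
-- raises there only when t = [], excluded by Pre_).
def pvGoB (rest t : List Char) : List Char :=
  let i := PySem.Chars.find rest ['?']
  if _h : i < 0 then rest
  else
    PySem.List.slice rest none (some i) ++
      t.getD 0 '?' ::
        pvGoB (PySem.List.slice rest (some (i + 1)) none)
          (PySem.List.slice t (some 1) none ++ PySem.List.slice t none (some 1))
termination_by rest.length
decreasing_by
  have hmem : ('?' : Char) ∈ rest := by
    have hinf := (PySem.Chars.find_ne_neg_one_iff rest ['?']).mp (by omega)
    exact (List.singleton_infix_iff _ _).mp hinf
  have hlen : rest.length ≠ 0 := by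
    intro h0
    exact absurd hmem (by simp [List.eq_nil_of_length_eq_zero h0])
  have hdrop := PySem.List.slice_from rest (a := PySem.Chars.find rest ['?'] + 1) (by omega)
  rw [hdrop]
  simp only [List.length_drop]
  omega

def replace_questions_alt (s : String) (t_str : String) : String :=
  String.ofList (pvGoB s.toList t_str.toList)

-- ===== PRECONDITION & SPEC =====
-- Pre_ excludes exactly the inputs where A raises (IndexError): t_str empty while s contains '?'.
def Pre_replace_questions (s : String) (t_str : String) : Prop :=
  PySem.Str.isIn "?" s = true → t_str ≠ ""
instance (s : String) (t_str : String) : Decidable (Pre_replace_questions s t_str) := by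
  unfold Pre_replace_questions; infer_instance

def pvWitness_replace_questions : String × String := ("a?b?c", "xy")

def Spec_replace_questions (s : String) (t_str : String) (out : String) : Prop :=
  out = replace_questions_alt s t_str
instance (s : String) (t_str : String) (out : String) : Decidable (Spec_replace_questions s t_str out) := by
  unfold Spec_replace_questions; infer_instance

-- ===== CLAIM (what is proved, stated in full; the proofs are below) =====
def Claim_equal_replace_questions : Prop := ∀ (s : String) (t_str : String), Dom_replace_questions s t_str → Pre_replace_questions s t_str → Spec_replace_questions s t_str (replace_questions s t_str)

-- ===== LEMMAS AND PROOFS =====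

lemma pv_prefix_singleton (a : Char) (l : List Char) : [a] <+: l ↔ l.head? = some a := by
  cases l with
  | nil => simp
  | cons b t => simp [List.cons_prefix_cons, eq_comm]

lemma pv_idxOf_min (a : Char) : ∀ (l : List Char) (m : Nat), m < l.idxOf a → l[m]? ≠ some a := by
  intro l
  induction l with
  | nil => intro m h; simp at h ⊢
  | cons b t ih =>
    intro m h
    by_cases hb : b = a
    · simp [hb, List.idxOf_cons_self] at h
    · cases m with
      | zero => simp [hb]
      | succ k =>
        have : k < t.idxOf a := by
          rw [List.idxOf_cons_ne _ hb] at h; omega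
        simpa using ih k this

lemma pv_not_mem_take_idxOf (a : Char) (l : List Char) : a ∉ l.take (l.idxOf a) := by
  intro hmem
  obtain ⟨m, hm, he⟩ := List.getElem_of_mem hmem
  have hm' : m < l.idxOf a := lt_of_lt_of_le hm (by simp [List.length_take])
  have : l[m]? = some a := by
    rw [List.getElem?_eq_getElem (lt_of_lt_of_le hm' (List.idxOf_le_length))]
    rw [List.getElem_take] at he
    simp [he]
  exact pv_idxOf_min a l m hm' this

lemma pv_find_absent (cs : List Char) (h : ('?' : Char) ∉ cs) :
    PySem.Chars.find cs ['?'] = -1 := by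
  rw [PySem.Chars.find_eq_neg_one_iff]
  intro hinf
  exact h ((List.singleton_infix_iff _ _).mp hinf)

lemma pv_find_present (cs : List Char) (h : ('?' : Char) ∈ cs) :
    PySem.Chars.find cs ['?'] = (cs.idxOf '?' : Int) := by
  have hne : PySem.Chars.find cs ['?'] ≠ -1 := by
    rw [PySem.Chars.find_ne_neg_one_iff]
    exact (List.singleton_infix_iff _ _).mpr h
  have hfz : PySem.Chars.findFrom cs ['?'] ((0 : Nat) : Int) none = PySem.Chars.find cs ['?'] := by
    simp [PySem.Chars.findFrom_zero]
  have hspec := PySem.Chars.findFrom_natCast_spec cs ['?'] 0 (Nat.zero_le _) (by rw [hfz]; exact hne)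
  rw [hfz] at hspec
  obtain ⟨h0, hpre, hmin⟩ := hspec
  set f := PySem.Chars.find cs ['?'] with hf
  have hj : cs.idxOf '?' < cs.length := List.idxOf_lt_length_of_mem h
  -- f.toNat points at a '?'
  have hat : cs[f.toNat]? = some '?' := by
    have := (pv_prefix_singleton '?' (cs.drop f.toNat)).mp hpre
    rwa [List.head?_drop] at this
  -- idxOf ≤ f.toNat
  have hle : cs.idxOf '?' ≤ f.toNat := by
    by_contra hlt
    exact pv_idxOf_min '?' cs f.toNat (by omega) hat
  -- f.toNat ≤ idxOf
  have hge : ¬ cs.idxOf '?' < f.toNat := by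
    intro hlt
    apply hmin (cs.idxOf '?') (Nat.zero_le _) hlt
    rw [pv_prefix_singleton, List.head?_drop, List.getElem?_eq_getElem hj]
    simp [List.getElem_idxOf hj]
  omega

lemma pvGoA_append_no_q (t : List Char) :
    ∀ (xs ys : List Char) (ti : Nat), ('?' : Char) ∉ xs →
      pvGoA t (xs ++ ys) ti = xs ++ pvGoA t ys ti := by
  intro xs
  induction xs with
  | nil => intro ys ti _; simp
  | cons c rest ih =>
    intro ys ti h
    have hc : c ≠ '?' := by intro hc; exact h (by simp [hc])
    have hr : ('?' : Char) ∉ rest := fun hm => h (by simp [hm])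
    simp [pvGoA, hc, ih ys ti hr]

lemma pvGoA_no_q (t : List Char) (xs : List Char) (ti : Nat) (h : ('?' : Char) ∉ xs) :
    pvGoA t xs ti = xs := by
  have := pvGoA_append_no_q t xs [] ti h
  simpa [pvGoA] using this

lemma pv_rotate_head (t : List Char) (ti : Nat) (hti : ti < t.length) :
    (t.rotate ti).getD 0 '?' = t.getD ti '?' := by
  rw [List.rotate_eq_drop_append_take (le_of_lt hti)]
  have hlt : 0 < (t.drop ti).length := by simp; omega
  rw [List.getD_eq_getElem?_getD, List.getElem?_append_left hlt, List.getElem?_drop]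
  rw [List.getD_eq_getElem?_getD]
  simp

lemma pv_main (t : List Char) (ht : t ≠ []) :
    ∀ (n : Nat) (cs : List Char), cs.length ≤ n → ∀ ti : Nat, ti < t.length →
      pvGoB cs (t.rotate ti) = pvGoA t cs ti := by
  have htpos : 0 < t.length := List.length_pos_of_ne_nil ht
  intro n
  induction n with
  | zero =>
    intro cs hcs ti _
    have : cs = [] := List.eq_nil_of_length_eq_zero (Nat.le_zero.mp hcs)
    subst this
    rw [pvGoB.eq_def]
    simp [pv_find_absent [] (by simp), pvGoA]
  | succ n ih =>
    intro cs hcs ti hti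
    by_cases hq : ('?' : Char) ∈ cs
    · -- replacement step
      have hj : cs.idxOf '?' < cs.length := List.idxOf_lt_length_of_mem hq
      rw [pvGoB.eq_def]
      simp only [pv_find_present cs hq]
      rw [dif_neg (by omega : ¬ ((cs.idxOf '?' : Int) < 0))]
      -- slices
      have hslice1 : PySem.List.slice cs none (some ((cs.idxOf '?' : Nat) : Int)) = cs.take (cs.idxOf '?') :=
        PySem.List.slice_to_natCast cs (cs.idxOf '?')
      have hslice2 : PySem.List.slice cs (some ((cs.idxOf '?' : Int) + 1)) none = cs.drop (cs.idxOf '?' + 1) := by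
        have hcast : ((cs.idxOf '?' : Int) + 1) = ((cs.idxOf '?' + 1 : Nat) : Int) := by push_cast; ring
        rw [hcast, PySem.List.slice_from_natCast]
      -- rotation step
      have hrlen : 1 ≤ (t.rotate ti).length := by
        rw [List.length_rotate]; omega
      have hrot1 : PySem.List.slice (t.rotate ti) (some 1) none ++
          PySem.List.slice (t.rotate ti) none (some 1) = t.rotate (ti + 1) := by
        have h1 : PySem.List.slice (t.rotate ti) (some 1) none = (t.rotate ti).drop 1 := by
          have : ((1 : Int)) = ((1 : Nat) : Int) := by norm_num
          rw [this, PySem.List.slice_from_natCast]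
        have h2 : PySem.List.slice (t.rotate ti) none (some 1) = (t.rotate ti).take 1 := by
          have : ((1 : Int)) = ((1 : Nat) : Int) := by norm_num
          rw [this, PySem.List.slice_to_natCast]
        rw [h1, h2, ← List.rotate_eq_drop_append_take hrlen, List.rotate_rotate]
      have hrotmod : t.rotate (ti + 1) = t.rotate ((ti + 1) % t.length) :=
        (List.rotate_mod t (ti + 1)).symm
      -- recursive call via IH
      have hdroplen : (cs.drop (cs.idxOf '?' + 1)).length ≤ n := by
        simp only [List.length_drop]; omega
      have hmod : (ti + 1) % t.length < t.length := Nat.mod_lt _ htpos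
      rw [hslice1, hslice2, hrot1, hrotmod, ih (cs.drop (cs.idxOf '?' + 1)) hdroplen _ hmod,
        pv_rotate_head t ti hti]
      -- now the A side
      have hcsj : cs[cs.idxOf '?'] = '?' := List.getElem_idxOf hj
      have hdecomp : cs = cs.take (cs.idxOf '?') ++ '?' :: cs.drop (cs.idxOf '?' + 1) := by
        conv_lhs => rw [← List.take_append_drop (cs.idxOf '?') cs]
        rw [List.drop_eq_getElem_cons hj, hcsj]
      conv_rhs => rw [hdecomp]
      rw [pvGoA_append_no_q t _ _ ti (pv_not_mem_take_idxOf '?' cs)]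
      simp [pvGoA]
    · -- no '?' left
      rw [pvGoB.eq_def]
      simp [pv_find_absent cs hq, pvGoA_no_q t cs ti hq]

-- ===== VERDICT (by name: the statement is the Claim_ definition above) =====
theorem replace_questions_spec : Claim_equal_replace_questions := by
  intro s t_str _ hpre
  unfold Spec_replace_questions replace_questions replace_questions_alt
  congr 1
  by_cases hq : ('?' : Char) ∈ s.toList
  · have ht : t_str.toList ≠ [] := by
      intro h0
      have hts : t_str = "" := by
        have := congrArg String.ofList h0
        simpa using this
      apply hpre _ hts
      rw [PySem.Str.isIn_eq]
      exact (PySem.Chars.isIn_iff_infix _ _).mpr ((List.singleton_infix_iff _ _).mpr (by simpa using hq))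
    have := pv_main t_str.toList ht s.toList.length s.toList (le_refl _) 0
      (List.length_pos_of_ne_nil ht)
    rw [List.rotate_zero] at this
    exact (this).symm
  · rw [pvGoA_no_q _ _ _ hq, pvGoB.eq_def]
    simp [pv_find_absent s.toList hq]
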